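-- pv_equiv track=rewrite | github.com/Daylily-Informatics/daylily-ursa | daylib/spot_market/runner.py | interval_seconds_to_label
-- ===== SOURCE A (Python) =====
-- from typing import Any, Dict, List, Optional
--
-- _INTERVAL_LABEL_TO_SECONDS: Dict[str, int] = {
--     "6h": 6 * 60 * 60,
--     "12h": 12 * 60 * 60,
--     "1d": 24 * 60 * 60,
-- }
--
-- def interval_seconds_to_label(seconds: int) -> str:
--     for label, sec in _INTERVAL_LABEL_TO_SECONDS.items():
--         if sec == seconds:
--             return label
--     if seconds >= 24 * 60 * 60:
--         return "1d"
--     if seconds >= 12 * 60 * 60: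
--         return "12h"
--     return "6h"
-- ===== SOURCE B (Python) =====
-- _THRESHOLDS = (43200, 86400)
-- _LABELS = ("6h", "12h", "1d")
--
-- def interval_seconds_to_label(seconds: int) -> str:
--     # branch-free: index = number of thresholds crossed
--     return _LABELS[sum(seconds >= t for t in _THRESHOLDS)]
-- ===== Notes on version B (the rewrite author's own statement) =====
-- stated objective: alternative
-- what changed: Replaced A's dict exact-match scan plus if/elif threshold chain by a branch-free table lookup: the label index is computed arithmetically as the count of thresholds (43200, 86400) that seconds reaches, then used to index a label tuple; the dict scan is dead code because each dict value sits exactly on a threshold boundary.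
import Mathlib
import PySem

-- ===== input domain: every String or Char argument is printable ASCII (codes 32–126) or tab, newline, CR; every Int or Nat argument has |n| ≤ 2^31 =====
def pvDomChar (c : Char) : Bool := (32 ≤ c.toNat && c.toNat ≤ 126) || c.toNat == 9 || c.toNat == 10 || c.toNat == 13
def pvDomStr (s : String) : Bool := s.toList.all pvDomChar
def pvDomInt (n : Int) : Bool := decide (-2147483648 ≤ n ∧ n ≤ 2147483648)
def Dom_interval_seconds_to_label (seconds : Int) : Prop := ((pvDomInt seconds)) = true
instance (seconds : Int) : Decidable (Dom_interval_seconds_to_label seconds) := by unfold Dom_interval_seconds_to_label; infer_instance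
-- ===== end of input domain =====

-- B replaces A's dict scan (dead code: each value sits on its threshold) + if/elif chain by a branch-free table lookup indexed by the count of thresholds crossed (alternative).

-- ===== PORT A =====
-- the module-level dict _INTERVAL_LABEL_TO_SECONDS, in insertion order
def intervalLabelToSeconds : PySem.Dict String Int :=
  (PySem.Dict.empty.insert "6h" (6 * 60 * 60)).insert "12h" (12 * 60 * 60) |>.insert "1d" (24 * 60 * 60)

-- loop 'for label, sec in d.items(): if sec == seconds: return label'
def intervalLoop (items : List (String × Int)) (seconds : Int) : Option String :=
  match items with
  | [] => none
  | (label, sec) :: rest => if sec = seconds then some label else intervalLoop rest seconds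

def interval_seconds_to_label (seconds : Int) : String :=
  match intervalLoop intervalLabelToSeconds.items seconds with
  | some label => label
  | none =>
    if seconds ≥ 24 * 60 * 60 then "1d"
    else if seconds ≥ 12 * 60 * 60 then "12h"
    else "6h"

-- ===== PORT B =====
def intervalThresholds : List Int := [43200, 86400]
def intervalLabels : List String := ["6h", "12h", "1d"]

-- sum(seconds >= t for t in _THRESHOLDS)
def intervalCrossed (seconds : Int) : Int :=
  intervalThresholds.foldl (fun acc t => acc + (if seconds ≥ t then 1 else 0)) 0

def interval_seconds_to_label_alt (seconds : Int) : String :=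
  -- index is always in range [0,2]; getD "" is only a totality guard
  (PySem.List.pyGet? intervalLabels (intervalCrossed seconds)).getD ""

-- ===== PRECONDITION & SPEC =====
def Spec_interval_seconds_to_label (seconds : Int) (out : String) : Prop := out = interval_seconds_to_label_alt seconds
instance (seconds : Int) (out : String) : Decidable (Spec_interval_seconds_to_label seconds out) := by unfold Spec_interval_seconds_to_label; infer_instance

-- ===== CLAIM =====
def Claim_equal_interval_seconds_to_label : Prop := ∀ (seconds : Int), Dom_interval_seconds_to_label seconds → Spec_interval_seconds_to_label seconds (interval_seconds_to_label seconds)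

-- ===== LEMMAS AND PROOFS =====

-- ===== VERDICT =====
theorem interval_seconds_to_label_spec : Claim_equal_interval_seconds_to_label := by
  intro seconds _
  unfold Spec_interval_seconds_to_label interval_seconds_to_label interval_seconds_to_label_alt
  unfold intervalCrossed intervalThresholds intervalLabels
  have hitems : intervalLabelToSeconds.items = [("6h", 21600), ("12h", 43200), ("1d", 86400)] := by
    decide
  rw [hitems]
  by_cases h1 : (21600 : Int) = seconds
  · subst h1; decide
  · by_cases h2 : (43200 : Int) = seconds
    · subst h2; decide
    · by_cases h3 : (86400 : Int) = seconds
      · subst h3; decide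
      · simp only [intervalLoop, if_neg h1, if_neg h2, if_neg h3, List.foldl]
        by_cases hb : seconds ≥ 86400
        · have ha : seconds ≥ 43200 := by omega
          norm_num [ha, hb, PySem.List.pyGet?, PySem.List.pyIdx?]; rfl
        · by_cases ha : seconds ≥ 43200
          · norm_num [ha, hb, PySem.List.pyGet?, PySem.List.pyIdx?]
          · norm_num [ha, hb, PySem.List.pyGet?, PySem.List.pyIdx?]
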